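-- pv_equiv track=rewrite | github.com/Vergil0327/leetcode-history | String/936. Stamping The Sequence/solution.py | movesToStamp
-- ===== SOURCE A (Python) =====
-- from typing import List
--
-- def movesToStamp(stamp: str, target: str) -> List[int]:
--     n = len(target)
--
--     def check(target, start):
--         valid = False
--         for i in range(len(stamp)):
--             if start+i >= n: return False
--             if target[start+i] == "*": continue
--             if target[start+i] != stamp[i]: return False
--             valid = True
--         return valid
--
--     def dfs(s):
--         if s[0] == "*" and len(set(s)) == 1: return []
--
--         for i in range(n):
--             if check(s, i):
--                 arr = dfs(s[:i] + "*"*len(stamp) + s[i+len(stamp):])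
--                 if arr and arr[0] == "RETURN": return ["RETURN"]
--                 return arr + [i]
--
--         return ["RETURN"] # 代表無解
--
--     ans = dfs(target)
--     return ans if ("RETURN" not in ans) and (len(ans) <= 10*n) else []
-- ===== SOURCE B (Python) =====
-- def movesToStamp(stamp, target):
--     n, m = len(target), len(stamp)
--     star = [c == '*' for c in target]
--     W = n - m + 1 if m <= n else 0
--     live = [sum(1 for j in range(m) if not star[w + j]) for w in range(W)]
--     bad = [sum(1 for j in range(m)
--                if not star[w + j] and target[w + j] != stamp[j]) for w in range(W)]
--     remaining = sum(1 for b in star if not b)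
--     res = []
--     while remaining > 0:
--         w = 0
--         while w < W and not (bad[w] == 0 and live[w] > 0):
--             w += 1
--         if w == W:
--             return []
--         res.append(w)
--         for t in range(m):
--             p = w + t
--             if not star[p]:
--                 star[p] = True
--                 remaining -= 1
--                 for v in range(max(0, p - m + 1), min(W, p + 1)):
--                     live[v] -= 1
--                     if target[p] != stamp[p - v]:
--                         bad[v] -= 1
--     return res[::-1]
-- ===== Notes on version B (the rewrite author's own statement) =====
-- stated objective: faster
-- what changed: Replaces A's recursive greedy (which re-checks every window character by character from index 0 and rebuilds the whole string after every stamp) by an iterative counter-based simulation: per-window mismatch ('bad') and non-star ('live') counters are built once, a window is valid iff bad = 0 and live > 0, and stamping a position only decrements the counters of the at most m windows covering it. Per stamp B does O(n + m^2) counter work instead of A's O(n*m) re-scan and O(n) string rebuild.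
import Mathlib
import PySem

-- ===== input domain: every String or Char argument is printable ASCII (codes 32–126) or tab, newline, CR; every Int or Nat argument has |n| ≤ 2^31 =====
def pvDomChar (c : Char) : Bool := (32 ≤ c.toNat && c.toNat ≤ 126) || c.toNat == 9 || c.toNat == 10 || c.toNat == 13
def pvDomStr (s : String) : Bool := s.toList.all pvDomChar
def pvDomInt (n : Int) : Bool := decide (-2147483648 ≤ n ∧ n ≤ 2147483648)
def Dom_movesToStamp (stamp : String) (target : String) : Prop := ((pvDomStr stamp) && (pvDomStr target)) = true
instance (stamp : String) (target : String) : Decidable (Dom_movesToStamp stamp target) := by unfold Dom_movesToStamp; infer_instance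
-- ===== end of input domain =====

-- B replaces A's recursive greedy (which re-checks every window character by character,
-- restarting from index 0 and rebuilding the whole string after every stamp) by a
-- counter-based simulation: per-window mismatch and non-star counters are built once,
-- a window is valid iff bad = 0 ∧ live > 0, and stamping a position only decrements the
-- counters of the ≤ m windows covering it.  Same return value on every non-empty target.

-- ===== PORT A =====
-- inner helper `check(target, start)` of A: loop over range(len(stamp)) with flag `valid`
def checkGoA (stamp s : List Char) (n start i : Nat) (valid : Bool) : Bool :=
  if _h : i < stamp.length then
    if n ≤ start + i then false
    else
      let c := s.getD (start + i) '?'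
      if c = '*' then checkGoA stamp s n start (i + 1) valid
      else if c ≠ stamp.getD i '?' then false
      else checkGoA stamp s n start (i + 1) true
  else valid
termination_by stamp.length - i

def checkA (stamp s : List Char) (n start : Nat) : Bool :=
  checkGoA stamp s n start 0 false

-- the `for i in range(n)` loop of dfs; `rec` is the recursive call to dfs (one fuel lower)
def loopA (stamp : List Char) (n : Nat) (rec : List Char → Option (List Int))
    (s : List Char) (i : Nat) : Option (List Int) :=
  if _h : i < n then
    if checkA stamp s n i then
      -- arr = dfs(s[:i] + "*"*len(stamp) + s[i+len(stamp):]); ["RETURN"] encoded as none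
      match rec (s.take i ++ List.replicate stamp.length '*' ++ s.drop (i + stamp.length)) with
      | none => none
      | some arr => some (arr ++ [(i : Int)])
    else loopA stamp n rec s (i + 1)
  else none            -- fell through the loop: return ["RETURN"]
termination_by n - i

-- dfs; fuel n+1 is an upper bound on the recursion depth (each stamp erases ≥ 1 non-star)
def dfsA (stamp : List Char) (n : Nat) : Nat → List Char → Option (List Int)
  | 0, _ => none
  | f + 1, s =>
    if s.getD 0 '?' = '*' ∧ (PySem.Set.ofList s).length = 1 then some []
    else loopA stamp n (dfsA stamp n f) s 0

def movesToStamp (stamp : String) (target : String) : List Int :=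
  let n := target.toList.length
  match dfsA stamp.toList n (n + 1) target.toList with
  | none => []      -- ans = ["RETURN"]: the "RETURN" not in ans filter fails
  | some ans => if ans.length ≤ 10 * n then ans else []

-- ===== PORT B =====
-- live = [sum(1 for j in range(m) if not star[w+j]) for w in range(W)]
def liveInit (star : List Bool) (m w : Nat) : Int :=
  (((List.range m).countP (fun j => !(star.getD (w + j) true))) : Int)

-- bad = [sum(1 for j in range(m) if not star[w+j] and target[w+j] != stamp[j]) for w in range(W)]
def badInit (stampL tgt : List Char) (star : List Bool) (m w : Nat) : Int :=
  (((List.range m).countP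
      (fun j => !(star.getD (w + j) true) && !(tgt.getD (w + j) '?' == stampL.getD j '?'))) : Int)

-- body of `for t in range(m): p = w+t; if not star[p]: …` — star/bad/live/remaining state;
-- max(0, p-m+1) is Nat subtraction p+1-m (clamps at 0, exact here), min(W, p+1) is `min`
def updatePos (stampL tgt : List Char) (W m p : Nat)
    (st : List Bool × List Int × List Int × Int) : List Bool × List Int × List Int × Int :=
  if st.1.getD p true then st
  else
    let lo := p + 1 - m
    let bl := (List.range' lo (min W (p + 1) - lo)).foldl
      (fun (bl : List Int × List Int) v =>
        (if tgt.getD p '?' == stampL.getD (p - v) '?' then bl.1 else bl.1.modify v (· - 1),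
         bl.2.modify v (· - 1))) (st.2.1, st.2.2.1)
    (st.1.set p true, bl.1, bl.2, st.2.2.2 - 1)

def stampAt (stampL tgt : List Char) (W m w : Nat)
    (st : List Bool × List Int × List Int × Int) : List Bool × List Int × List Int × Int :=
  (List.range m).foldl (fun st t => updatePos stampL tgt W m (w + t) st) st

-- `w = 0; while w < W and not (bad[w] == 0 and live[w] > 0): w += 1` (none = fell off: w == W)
def findW (bad live : List Int) (W w : Nat) : Option Nat :=
  if _h : w < W then
    if bad.getD w 0 == 0 && live.getD w 0 > 0 then some w
    else findW bad live W (w + 1)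
  else none
termination_by W - w

-- the `while remaining > 0` loop; fuel n+1 bounds its rounds (each stamp clears ≥ 1 position)
def roundsB (stampL tgt : List Char) (W m : Nat) :
    Nat → (List Bool × List Int × List Int × Int) → List Int → List Int
  | 0, _, _ => []          -- fuel exhausted (unreachable: ≤ n rounds happen)
  | f + 1, st, res =>
    if st.2.2.2 > 0 then
      match findW st.2.1 st.2.2.1 W 0 with
      | none => []         -- `if w == W: return []`
      | some w => roundsB stampL tgt W m f (stampAt stampL tgt W m w st) (res ++ [(w : Int)])
    else res.reverse       -- `return res[::-1]`

def movesToStamp_alt (stamp : String) (target : String) : List Int :=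
  let tgt := target.toList
  let stampL := stamp.toList
  let n := tgt.length
  let m := stampL.length
  let star := tgt.map (fun c => c == '*')
  let W := if m ≤ n then n - m + 1 else 0
  let live := (List.range W).map (fun w => liveInit star m w)
  let bad := (List.range W).map (fun w => badInit stampL tgt star m w)
  let rem := (((star.filter (fun b => !b)).length : Nat) : Int)
  roundsB stampL tgt W m (n + 1) (star, bad, live, rem) []

-- ===== PRECONDITION & SPEC =====
-- Pre_ excludes only the empty target, on which A raises IndexError at s[0].
def Pre_movesToStamp (stamp : String) (target : String) : Prop := target ≠ ""
instance (stamp : String) (target : String) : Decidable (Pre_movesToStamp stamp target) := by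
  unfold Pre_movesToStamp; infer_instance

def pvWitness_movesToStamp : String × String := ("ab", "aabab")

def Spec_movesToStamp (stamp : String) (target : String) (out : List Int) : Prop :=
  out = movesToStamp_alt stamp target
instance (stamp : String) (target : String) (out : List Int) : Decidable (Spec_movesToStamp stamp target out) := by
  unfold Spec_movesToStamp; infer_instance

-- ===== CLAIM (what is proved, stated in full; the proofs are below) =====
def Claim_equal_movesToStamp : Prop := ∀ (stamp : String) (target : String),
  Dom_movesToStamp stamp target → Pre_movesToStamp stamp target →
  Spec_movesToStamp stamp target (movesToStamp stamp target)

-- ===== LEMMAS AND PROOFS =====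

-- A's state string induced by the star mask (proof-side abstraction)
def sArr (tgt : List Char) (star : List Bool) : List Char :=
  (List.range tgt.length).map (fun p => if star.getD p true then '*' else tgt.getD p '?')

-- target chars that are literally '*' are always marked starred
def StarOK (tgt : List Char) (star : List Bool) : Prop :=
  ∀ p, p < tgt.length → tgt.getD p '?' = '*' → star.getD p true = true

-- window [w, w+m) set to true
def setWin (star : List Bool) (w m : Nat) : List Bool :=
  (List.range m).foldl (fun s t => s.set (w + t) true) star

def remSpec (star : List Bool) : Int := (((star.filter (fun b => !b)).length : Nat) : Int)

-- the loop invariant of B's round loop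
def InvB (stampL tgt : List Char) (W : Nat)
    (st : List Bool × List Int × List Int × Int) : Prop :=
  st.1.length = tgt.length ∧ st.2.1.length = W ∧ st.2.2.1.length = W ∧
  StarOK tgt st.1 ∧
  (∀ w, w < W → st.2.1.getD w 0 = badInit stampL tgt st.1 stampL.length w) ∧
  (∀ w, w < W → st.2.2.1.getD w 0 = liveInit st.1 stampL.length w) ∧
  st.2.2.2 = remSpec st.1

lemma length_sArr (tgt : List Char) (star : List Bool) : (sArr tgt star).length = tgt.length := by
  simp [sArr]

lemma getD_sArr (tgt : List Char) (star : List Bool) (p : Nat) (hp : p < tgt.length) :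
    (sArr tgt star).getD p '?' = if star.getD p true then '*' else tgt.getD p '?' := by
  simp [sArr, List.getD_eq_getElem?_getD, List.getElem?_map, List.getElem?_range, hp]

-- characterization of A's check loop (when the window fits)
lemma checkGoA_char (stampL s : List Char) (n w : Nat) (hmn : w + stampL.length ≤ n) :
    ∀ j v, (checkGoA stampL s n w j v = true ↔
      ((∀ t, j ≤ t → t < stampL.length →
          (s.getD (w + t) '?' = '*' ∨ s.getD (w + t) '?' = stampL.getD t '?')) ∧
       (v = true ∨ ∃ t, j ≤ t ∧ t < stampL.length ∧ s.getD (w + t) '?' ≠ '*'))) := by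
  suffices hs : ∀ k j v, stampL.length - j ≤ k → (checkGoA stampL s n w j v = true ↔
      ((∀ t, j ≤ t → t < stampL.length →
          (s.getD (w + t) '?' = '*' ∨ s.getD (w + t) '?' = stampL.getD t '?')) ∧
       (v = true ∨ ∃ t, j ≤ t ∧ t < stampL.length ∧ s.getD (w + t) '?' ≠ '*'))) from
    fun j v => hs _ j v le_rfl
  intro k
  induction k with
  | zero =>
    intro j v hk
    rw [checkGoA]
    have hj : ¬ j < stampL.length := by omega
    simp only [hj, dif_neg, not_false_iff]
    constructor
    · intro hv
      exact ⟨fun t ht1 ht2 => absurd ht2 (by omega), Or.inl hv⟩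
    · rintro ⟨-, hv | ⟨t, ht1, ht2, -⟩⟩
      · exact hv
      · omega
  | succ k ih =>
    intro j v hk
    rw [checkGoA]
    by_cases hj : j < stampL.length
    · have hb : ¬ n ≤ w + j := by omega
      simp only [hj, dif_pos, hb, if_false]
      by_cases hstar : s.getD (w + j) '?' = '*'
      · rw [if_pos hstar, ih (j + 1) v (by omega)]
        constructor
        · rintro ⟨hall, hv⟩
          refine ⟨?_, ?_⟩
          · intro t ht1 ht2
            rcases Nat.eq_or_lt_of_le ht1 with rfl | hlt
            · exact Or.inl hstar
            · exact hall t (by omega) ht2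
          · rcases hv with hv | ⟨t, ht1, ht2, ht3⟩
            · exact Or.inl hv
            · exact Or.inr ⟨t, by omega, ht2, ht3⟩
        · rintro ⟨hall, hv⟩
          refine ⟨fun t ht1 ht2 => hall t (by omega) ht2, ?_⟩
          rcases hv with hv | ⟨t, ht1, ht2, ht3⟩
          · exact Or.inl hv
          · rcases Nat.eq_or_lt_of_le ht1 with rfl | hlt
            · exact absurd hstar ht3
            · exact Or.inr ⟨t, by omega, ht2, ht3⟩
      · rw [if_neg hstar]
        by_cases hmis : s.getD (w + j) '?' ≠ stampL.getD j '?'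
        · rw [if_pos hmis]
          constructor
          · intro hfalse
            exact absurd hfalse (by simp)
          · rintro ⟨hall, -⟩
            rcases hall j le_rfl hj with hh | hh
            · exact absurd hh hstar
            · exact absurd hh hmis
        · rw [if_neg hmis]
          push_neg at hmis
          rw [ih (j + 1) true (by omega)]
          constructor
          · rintro ⟨hall, -⟩
            refine ⟨?_, Or.inr ⟨j, le_rfl, hj, hstar⟩⟩
            intro t ht1 ht2
            rcases Nat.eq_or_lt_of_le ht1 with rfl | hlt
            · exact Or.inr hmis
            · exact hall t (by omega) ht2
          · rintro ⟨hall, -⟩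
            exact ⟨fun t ht1 ht2 => hall t (by omega) ht2, Or.inl rfl⟩
    · simp only [hj, dif_neg, not_false_iff]
      constructor
      · intro hv
        exact ⟨fun t ht1 ht2 => absurd ht2 (by omega), Or.inl hv⟩
      · rintro ⟨-, hv | ⟨t, ht1, ht2, -⟩⟩
        · exact hv
        · omega

lemma checkGo_oob (stamp s : List Char) (n i : Nat) (hlt : n < i + stamp.length) :
    ∀ j v, i + j ≤ n → checkGoA stamp s n i j v = false := by
  suffices h : ∀ k j v, stamp.length - j ≤ k → i + j ≤ n →
      checkGoA stamp s n i j v = false from fun j v => h _ j v le_rfl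
  intro k
  induction k with
  | zero =>
    intro j v hk hjn
    omega
  | succ k ih =>
    intro j v hk hjn
    have hj : j < stamp.length := by omega
    rw [checkGoA]
    simp only [hj, dif_pos]
    by_cases hb : n ≤ i + j
    · simp [hb]
    · simp only [if_neg hb]
      split_ifs <;> first | rfl | exact ih (j + 1) _ (by omega) (by omega)

lemma checkA_iff_counters (stampL tgt : List Char) (star : List Bool) (w : Nat)
    (hlen : star.length = tgt.length) (hOK : StarOK tgt star)
    (hwm : w + stampL.length ≤ tgt.length) :
    checkA stampL (sArr tgt star) tgt.length w = true ↔
      (badInit stampL tgt star stampL.length w = 0 ∧ 0 < liveInit star stampL.length w) := by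
  unfold checkA
  rw [checkGoA_char stampL (sArr tgt star) tgt.length w hwm 0 false]
  have hstar_char : ∀ t, t < stampL.length →
      ((sArr tgt star).getD (w + t) '?' = '*' ↔ star.getD (w + t) true = true) := by
    intro t ht
    rw [getD_sArr tgt star (w + t) (by omega)]
    by_cases hst : star.getD (w + t) true = true
    · rw [if_pos hst]
      exact ⟨fun _ => hst, fun _ => rfl⟩
    · rw [if_neg (by simpa using hst)]
      exact ⟨fun he => hOK (w + t) (by omega) he, fun he => absurd he hst⟩
  have htval : ∀ t, t < stampL.length → ¬ star.getD (w + t) true = true →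
      (sArr tgt star).getD (w + t) '?' = tgt.getD (w + t) '?' := by
    intro t ht hst
    rw [getD_sArr tgt star (w + t) (by omega), if_neg (by simpa using hst)]
  have hbad0 : badInit stampL tgt star stampL.length w = 0 ↔
      ∀ t, t < stampL.length →
        (star.getD (w + t) true = true ∨ tgt.getD (w + t) '?' = stampL.getD t '?') := by
    unfold badInit
    rw [Int.natCast_eq_zero, List.countP_eq_zero]
    constructor
    · intro h t ht
      have hh := h t (List.mem_range.mpr ht)
      by_cases hst : star.getD (w + t) true = true
      · exact Or.inl hst
      · right
        by_contra hne
        apply hh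
        simp only [Bool.and_eq_true, Bool.not_eq_true']
        exact ⟨by simpa using hst, by simpa using hne⟩
    · intro h j hj
      simp only [Bool.and_eq_true, Bool.not_eq_true', not_and]
      intro hst2
      rcases h j (List.mem_range.mp hj) with hst | heq
      · rw [hst2] at hst
        exact absurd hst (by simp)
      · exact fun hf => (beq_eq_false_iff_ne.mp hf) heq
  have hlive0 : 0 < liveInit star stampL.length w ↔
      ∃ t, t < stampL.length ∧ ¬ star.getD (w + t) true = true := by
    unfold liveInit
    rw [Int.natCast_pos, List.countP_pos_iff]
    constructor
    · rintro ⟨j, hj, hpj⟩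
      exact ⟨j, List.mem_range.mp hj, by simpa using hpj⟩
    · rintro ⟨t, ht, hst⟩
      exact ⟨t, List.mem_range.mpr ht, by simpa using hst⟩
  constructor
  · rintro ⟨hall, hv | ⟨t0, -, ht0, hne0⟩⟩
    · exact absurd hv (by simp)
    · refine ⟨hbad0.mpr ?_, hlive0.mpr ⟨t0, ht0, fun hst => hne0 ((hstar_char t0 ht0).mpr hst)⟩⟩
      intro t ht
      by_cases hst : star.getD (w + t) true = true
      · exact Or.inl hst
      · rcases hall t (Nat.zero_le t) ht with hh | hh
        · exact Or.inl ((hstar_char t ht).mp hh)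
        · rw [htval t ht hst] at hh
          exact Or.inr hh
  · rintro ⟨hb, hl⟩
    obtain ⟨t0, ht0, hst0⟩ := hlive0.mp hl
    refine ⟨?_, Or.inr ⟨t0, Nat.zero_le _, ht0, ?_⟩⟩
    · intro t ht1 ht2
      by_cases hst : star.getD (w + t) true = true
      · exact Or.inl ((hstar_char t ht2).mpr hst)
      · rcases hbad0.mp hb t ht2 with hh | hh
        · exact absurd hh hst
        · rw [htval t ht2 hst]
          exact Or.inr hh
    · intro he
      exact hst0 ((hstar_char t0 ht0).mp he)

lemma set_true_self (star : List Bool) (p : Nat) (h : star.getD p true = true) :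
    star.set p true = star := by
  apply List.ext_getElem?
  intro j
  rw [List.getElem?_set]
  by_cases he : p = j
  · subst he
    by_cases hp : p < star.length
    · rw [if_pos rfl, if_pos hp]
      rw [List.getD_eq_getElem _ _ hp] at h
      rw [List.getElem?_eq_getElem hp, h]
    · rw [if_pos rfl, if_neg hp]
      rw [eq_comm, List.getElem?_eq_none_iff]
      omega
  · rw [if_neg he]

lemma getD_set' (l : List Bool) (i j : Nat) (x : Bool) :
    (l.set i x).getD j true = if i = j ∧ i < l.length then x else l.getD j true := by
  rw [List.getD_eq_getElem?_getD, List.getElem?_set]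
  by_cases he : i = j
  · subst he
    by_cases hp : i < l.length
    · simp [hp]
    · rw [if_pos rfl, if_neg hp, if_neg (by omega)]
      rw [List.getD_eq_getElem?_getD, List.getElem?_eq_none (by omega)]
  · rw [if_neg he, if_neg (by omega), List.getD_eq_getElem?_getD]

lemma setWin_succ (star : List Bool) (w m : Nat) :
    setWin star w (m + 1) = (setWin star w m).set (w + m) true := by
  unfold setWin
  rw [List.range_succ, List.foldl_append]
  simp

-- component-wise view of the pair fold inside updatePos
lemma foldl_pair {α : Type} (l : List α) (Fb Fl : List Int → α → List Int) (b li : List Int) :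
    (l.foldl (fun (bl : List Int × List Int) v => (Fb bl.1 v, Fl bl.2 v)) (b, li)) =
      (l.foldl Fb b, l.foldl Fl li) := by
  induction l generalizing b li with
  | nil => rfl
  | cons x xs ih => simp [List.foldl_cons, ih]

lemma getD_modify_int (arr : List Int) (i w : Nat) (f : Int → Int) :
    (arr.modify i f).getD w 0 = if i = w ∧ w < arr.length then f (arr.getD w 0) else arr.getD w 0 := by
  rw [List.getD_eq_getElem?_getD, List.getD_eq_getElem?_getD, List.getElem?_modify]
  by_cases hw : w < arr.length
  · rw [List.getElem?_eq_getElem hw]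
    by_cases he : i = w
    · rw [if_pos ⟨he, hw⟩]
      simp [he]
    · rw [if_neg (by tauto)]
      simp [he]
  · rw [List.getElem?_eq_none (by omega), if_neg (by tauto)]
    rfl

-- a fold of conditional decrements over a contiguous range, read back pointwise
lemma foldDec_getD (g : Nat → Bool) (arr : List Int) (lo len w : Nat) :
    ((List.range' lo len).foldl (fun a v => if g v then a.modify v (· - 1) else a) arr).getD w 0
      = arr.getD w 0 -
        (if lo ≤ w ∧ w < lo + len ∧ g w = true ∧ w < arr.length then 1 else 0) := by
  induction len generalizing lo arr with
  | zero =>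
    rw [if_neg (by omega)]
    simp [List.range']
  | succ len ih =>
    rw [List.range'_succ, List.foldl_cons, ih]
    have hlen1 : (if g lo then arr.modify lo (· - 1) else arr).length = arr.length := by
      split_ifs <;> simp
    have h1 : (if g lo then arr.modify lo (· - 1) else arr).getD w 0 =
        arr.getD w 0 - (if lo = w ∧ g w = true ∧ w < arr.length then 1 else 0) := by
      by_cases hg : g lo
      · rw [if_pos hg, getD_modify_int]
        by_cases he : lo = w ∧ w < arr.length
        · rw [if_pos he, if_pos ⟨he.1, he.1 ▸ hg, he.2⟩]
        · rw [if_neg he, if_neg (by tauto)]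
          omega
      · rw [if_neg hg, if_neg (by rintro ⟨rfl, hgw, -⟩; exact hg hgw)]
        omega
    rw [hlen1, h1]
    by_cases hgw : g w = true
    · have e1 : (lo + 1 ≤ w ∧ w < lo + 1 + len ∧ g w = true ∧ w < arr.length) ↔
          (lo + 1 ≤ w ∧ w < lo + 1 + len ∧ w < arr.length) := by tauto
      have e2 : (lo ≤ w ∧ w < lo + (len + 1) ∧ g w = true ∧ w < arr.length) ↔
          (lo ≤ w ∧ w < lo + (len + 1) ∧ w < arr.length) := by tauto
      have e3 : (lo = w ∧ g w = true ∧ w < arr.length) ↔ (lo = w ∧ w < arr.length) := by tauto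
      rw [if_congr e1 rfl rfl, if_congr e2 rfl rfl, if_congr e3 rfl rfl]
      split_ifs <;> omega
    · rw [if_neg (by tauto), if_neg (by tauto), if_neg (by tauto)]
      omega

lemma foldDec_length (g : Nat → Bool) (arr : List Int) (lo len : Nat) :
    ((List.range' lo len).foldl (fun a v => if g v then a.modify v (· - 1) else a) arr).length
      = arr.length := by
  induction len generalizing lo arr with
  | zero => simp [List.range']
  | succ len ih =>
    rw [List.range'_succ, List.foldl_cons, ih]
    split_ifs <;> simp

-- countP over range m after flipping exactly one index from true to false
lemma countP_flip (m j0 : Nat) (p q : Nat → Bool) (hj0 : j0 < m)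
    (hp : p j0 = true) (hq : q j0 = false)
    (hagree : ∀ j, j < m → j ≠ j0 → p j = q j) :
    ((List.range m).countP q : Int) = ((List.range m).countP p : Int) - 1 := by
  have hmem : j0 ∈ List.range m := List.mem_range.mpr hj0
  have hperm : (List.range m).Perm (j0 :: (List.range m).erase j0) := List.perm_cons_erase hmem
  rw [hperm.countP_eq q, hperm.countP_eq p, List.countP_cons, List.countP_cons]
  have hcongr : ((List.range m).erase j0).countP p = ((List.range m).erase j0).countP q := by
    apply List.countP_congr
    intro x hx
    have hx2 := (List.Nodup.mem_erase_iff (List.nodup_range)).mp hx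
    rw [hagree x (List.mem_range.mp hx2.2) hx2.1]
  rw [hcongr, hp, hq]
  simp

lemma countP_set_flip (l : List Bool) (p : Nat) (hp : l.getD p true = false) :
    (((l.set p true).filter (fun b => !b)).length : Int) =
      ((l.filter (fun b => !b)).length : Int) - 1 := by
  induction l generalizing p with
  | nil =>
    rw [List.getD_eq_getElem?_getD] at hp
    simp at hp
  | cons a t ih =>
    cases p with
    | zero =>
      have ha : a = false := by simpa using hp
      subst ha
      rw [List.set_cons_zero, List.filter_cons, List.filter_cons]
      simp
    | succ p =>
      have hp' : t.getD p true = false := by simpa using hp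
      rw [List.set_cons_succ, List.filter_cons, List.filter_cons]
      by_cases hb : (!a) = true
      · rw [if_pos hb, if_pos hb, List.length_cons, List.length_cons]
        have hih := ih p hp'
        push_cast at hih ⊢
        omega
      · rw [if_neg hb, if_neg hb]
        exact ih p hp' 

lemma foldDecNeg_getD (g : Nat → Bool) (arr : List Int) (lo len w : Nat) :
    ((List.range' lo len).foldl (fun a v => if g v = true then a else a.modify v (· - 1)) arr).getD w 0
      = arr.getD w 0 -
        (if lo ≤ w ∧ w < lo + len ∧ g w = false ∧ w < arr.length then 1 else 0) := by
  have hfun : (fun (a : List Int) v => if g v = true then a else a.modify v (· - 1)) =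
      (fun (a : List Int) v => if (!(g v)) = true then a.modify v (· - 1) else a) := by
    funext a v
    cases hgv : g v <;> simp
  rw [hfun, foldDec_getD]
  congr 1
  apply if_congr _ rfl rfl
  constructor
  · rintro ⟨a, b, c, d⟩
    exact ⟨a, b, by simpa using c, d⟩
  · rintro ⟨a, b, c, d⟩
    exact ⟨a, b, by simpa using c, d⟩

lemma foldDecNeg_length (g : Nat → Bool) (arr : List Int) (lo len : Nat) :
    ((List.range' lo len).foldl (fun a v => if g v = true then a else a.modify v (· - 1)) arr).length
      = arr.length := by
  have hfun : (fun (a : List Int) v => if g v = true then a else a.modify v (· - 1)) =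
      (fun (a : List Int) v => if (!(g v)) = true then a.modify v (· - 1) else a) := by
    funext a v
    cases hgv : g v <;> simp
  rw [hfun, foldDec_length]

lemma foldDecAll_getD (arr : List Int) (lo len w : Nat) :
    ((List.range' lo len).foldl (fun a v => a.modify v (· - 1)) arr).getD w 0
      = arr.getD w 0 - (if lo ≤ w ∧ w < lo + len ∧ w < arr.length then 1 else 0) := by
  have hfun : (fun (a : List Int) (v : Nat) => a.modify v (· - 1)) =
      (fun (a : List Int) v => if (fun _ : Nat => (true : Bool)) v = true
        then a.modify v (· - 1) else a) := by
    funext a v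
    simp
  rw [hfun, foldDec_getD]
  congr 1
  apply if_congr _ rfl rfl
  constructor
  · rintro ⟨a, b, c, d⟩
    exact ⟨a, b, d⟩
  · rintro ⟨a, b, c⟩
    exact ⟨a, b, rfl, c⟩

lemma foldDecAll_length (arr : List Int) (lo len : Nat) :
    ((List.range' lo len).foldl (fun a v => a.modify v (· - 1)) arr).length = arr.length := by
  have hfun : (fun (a : List Int) (v : Nat) => a.modify v (· - 1)) =
      (fun (a : List Int) v => if (fun _ : Nat => (true : Bool)) v = true
        then a.modify v (· - 1) else a) := by
    funext a v
    simp
  rw [hfun, foldDec_length]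

lemma updatePos_inv (stampL tgt : List Char) (W : Nat) (p : Nat)
    (st : List Bool × List Int × List Int × Int)
    (hW : W = if stampL.length ≤ tgt.length then tgt.length - stampL.length + 1 else 0)
    (hinv : InvB stampL tgt W st) (hp : p < tgt.length) :
    InvB stampL tgt W (updatePos stampL tgt W stampL.length p st) ∧
      (updatePos stampL tgt W stampL.length p st).1 = st.1.set p true := by
  obtain ⟨star, bad, live, rem⟩ := st
  obtain ⟨h1, h2, h3, h4, h5, h6, h7⟩ := hinv
  simp only at h1 h2 h3 h4 h5 h6 h7
  by_cases hs : star.getD p true = true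
  · rw [show updatePos stampL tgt W stampL.length p (star, bad, live, rem) = (star, bad, live, rem) from by
      unfold updatePos; rw [if_pos hs]]
    exact ⟨⟨h1, h2, h3, h4, h5, h6, h7⟩, by simp only; rw [set_true_self star p hs]⟩
  · have hs' : star.getD p true = false := by simpa using hs
    have hplen : p < star.length := by
      by_contra hply
      have hT : star.getD p true = true := by
        rw [List.getD_eq_getElem?_getD, List.getElem?_eq_none (by omega)]
        rfl
      rw [hT] at hs'
      cases hs'
    have hexp : updatePos stampL tgt W stampL.length p (star, bad, live, rem) =
        (star.set p true,
         (List.range' (p + 1 - stampL.length) (min W (p + 1) - (p + 1 - stampL.length))).foldl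
           (fun a v => if tgt.getD p '?' == stampL.getD (p - v) '?' then a
             else a.modify v (· - 1)) bad,
         (List.range' (p + 1 - stampL.length) (min W (p + 1) - (p + 1 - stampL.length))).foldl
           (fun a v => a.modify v (· - 1)) live,
         rem - 1) := by
      unfold updatePos
      rw [if_neg hs]
      simp only
      rw [foldl_pair _ (fun a v => if tgt.getD p '?' == stampL.getD (p - v) '?' then a
            else a.modify v (· - 1)) (fun a v => a.modify v (· - 1)) bad live]
    rw [hexp]
    have hbadset : ∀ w, w < W →
        badInit stampL tgt (star.set p true) stampL.length w =
          badInit stampL tgt star stampL.length w -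
            (if w ≤ p ∧ p < w + stampL.length ∧
                (tgt.getD p '?' == stampL.getD (p - w) '?') = false then 1 else 0) := by
      intro w hw
      unfold badInit
      by_cases hcov : w ≤ p ∧ p < w + stampL.length
      · have hj0 : p - w < stampL.length := by omega
        have hwj0 : w + (p - w) = p := by omega
        by_cases hmis : (tgt.getD p '?' == stampL.getD (p - w) '?') = false
        · rw [if_pos ⟨hcov.1, hcov.2, hmis⟩]
          apply countP_flip stampL.length (p - w) _ _ hj0
          · rw [hwj0, hs', hmis]
            rfl
          · rw [hwj0, getD_set', if_pos ⟨rfl, hplen⟩]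
            rfl
          · intro j hj hne
            rw [getD_set', if_neg (by rintro ⟨he, -⟩; exact hne (by omega))]
        · have hmis' : (tgt.getD p '?' == stampL.getD (p - w) '?') = true := by
            simpa using hmis
          rw [if_neg (by tauto), sub_zero]
          congr 1
          apply List.countP_congr
          intro j hj
          rw [getD_set']
          by_cases he : p = w + j ∧ p < star.length
          · rw [if_pos he]
            have hjj : j = p - w := by omega
            subst hjj
            rw [hwj0, hs', hmis']
            rfl
          · rw [if_neg he]
      · rw [if_neg (by tauto), sub_zero]
        congr 1
        apply List.countP_congr
        intro j hj
        rw [getD_set', if_neg (by rintro ⟨he, -⟩; exact hcov ⟨by omega, by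
          have := List.mem_range.mp hj; omega⟩)]
    have hliveset : ∀ w, w < W →
        liveInit (star.set p true) stampL.length w =
          liveInit star stampL.length w -
            (if w ≤ p ∧ p < w + stampL.length then 1 else 0) := by
      intro w hw
      unfold liveInit
      by_cases hcov : w ≤ p ∧ p < w + stampL.length
      · have hj0 : p - w < stampL.length := by omega
        have hwj0 : w + (p - w) = p := by omega
        rw [if_pos hcov]
        apply countP_flip stampL.length (p - w) _ _ hj0
        · rw [hwj0, hs']
          rfl
        · rw [hwj0, getD_set', if_pos ⟨rfl, hplen⟩]
          rfl
        · intro j hj hne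
          rw [getD_set', if_neg (by rintro ⟨he, -⟩; exact hne (by omega))]
      · rw [if_neg hcov, sub_zero]
        congr 1
        apply List.countP_congr
        intro j hj
        rw [getD_set', if_neg (by rintro ⟨he, -⟩; exact hcov ⟨by omega, by
          have := List.mem_range.mp hj; omega⟩)]
    have hmleW : ∀ w, w < W → stampL.length ≤ tgt.length := by
      intro w hw
      by_contra hmn
      rw [if_neg hmn] at hW
      omega
    refine ⟨⟨?_, ?_, ?_, ?_, ?_, ?_, ?_⟩, rfl⟩
    · simpa using h1
    · rw [foldDecNeg_length]
      exact h2
    · rw [foldDecAll_length]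
      exact h3
    · intro q hq hstar
      rw [getD_set']
      by_cases he : p = q ∧ p < star.length
      · rw [if_pos he]
      · rw [if_neg he]
        exact h4 q hq hstar
    · intro w hw
      rw [foldDecNeg_getD, h2, h5 w hw, hbadset w hw]
      have hm : stampL.length ≤ tgt.length := hmleW w hw
      have hW' := hW
      rw [if_pos hm] at hW'
      congr 1
      apply if_congr _ rfl rfl
      constructor
      · rintro ⟨a, b, c, d⟩
        exact ⟨by omega, by omega, c⟩
      · rintro ⟨a, b, c⟩
        exact ⟨by omega, by omega, c, by omega⟩
    · intro w hw
      rw [foldDecAll_getD, h3, h6 w hw, hliveset w hw]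
      have hm : stampL.length ≤ tgt.length := hmleW w hw
      have hW' := hW
      rw [if_pos hm] at hW'
      congr 1
      apply if_congr _ rfl rfl
      constructor
      · rintro ⟨a, b, c⟩
        exact ⟨by omega, by omega⟩
      · rintro ⟨a, b⟩
        exact ⟨by omega, by omega, by omega⟩
    · rw [h7]
      unfold remSpec
      rw [countP_set_flip star p hs']

lemma stampAt_inv (stampL tgt : List Char) (W w : Nat)
    (st : List Bool × List Int × List Int × Int)
    (hW : W = if stampL.length ≤ tgt.length then tgt.length - stampL.length + 1 else 0)
    (hinv : InvB stampL tgt W st) (hwm : w + stampL.length ≤ tgt.length) :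
    InvB stampL tgt W (stampAt stampL tgt W stampL.length w st) ∧
      (stampAt stampL tgt W stampL.length w st).1 = setWin st.1 w stampL.length := by
  have aux : ∀ t, t ≤ stampL.length →
      InvB stampL tgt W ((List.range t).foldl
        (fun st2 u => updatePos stampL tgt W stampL.length (w + u) st2) st) ∧
      ((List.range t).foldl
        (fun st2 u => updatePos stampL tgt W stampL.length (w + u) st2) st).1 = setWin st.1 w t := by
    intro t
    induction t with
    | zero => intro _; exact ⟨hinv, rfl⟩
    | succ t ih =>
      intro ht
      obtain ⟨ha, hb⟩ := ih (by omega)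
      rw [List.range_succ, List.foldl_append, List.foldl_cons, List.foldl_nil]
      obtain ⟨hc, hd⟩ := updatePos_inv stampL tgt W (w + t) _ hW ha (by omega)
      exact ⟨hc, by rw [hd, hb, setWin_succ]⟩
  exact aux stampL.length le_rfl

-- B's in-place stamping equals A's slice-splice string
lemma stamp_foldl (s : List Char) (i m : Nat) (h : i + m ≤ s.length) :
    (List.range m).foldl (fun s2 t => s2.set (i + t) '*') s =
      s.take i ++ List.replicate m '*' ++ s.drop (i + m) := by
  induction m with
  | zero => simpa using (List.take_append_drop i s).symm
  | succ m ih =>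
    rw [List.range_succ, List.foldl_append, ih (by omega)]
    simp only [List.foldl_cons, List.foldl_nil]
    have hlt : i + m < s.length := by omega
    have htk : (s.take i).length = i := by simp; omega
    rw [List.drop_eq_getElem_cons hlt]
    rw [List.append_assoc, List.set_append_right _ _ (by rw [htk]; omega)]
    rw [List.set_append_right _ _ (by rw [htk]; simp)]
    have hidx : i + m - (s.take i).length - (List.replicate m '*').length = 0 := by
      rw [htk]; simp
    rw [hidx, List.set_cons_zero]
    simp only [List.replicate_succ' (n := m), List.append_assoc, List.cons_append,
      List.nil_append]
    congr 3

lemma sArr_set (tgt : List Char) (star : List Bool) (p : Nat) (hp : p < tgt.length) :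
    (sArr tgt star).set p '*' = sArr tgt (star.set p true) := by
  apply List.ext_getElem?
  intro j
  rw [List.getElem?_set]
  by_cases he : p = j
  · subst he
    rw [length_sArr, if_pos rfl, if_pos hp]
    have hval : (sArr tgt (star.set p true)).getD p '?' = '*' := by
      rw [getD_sArr _ _ _ hp, getD_set']
      by_cases hc : p = p ∧ p < star.length
      · rw [if_pos hc]
        rfl
      · rw [if_neg hc]
        have hge : ¬ p < star.length := by tauto
        rw [show star.getD p true = true from by
          rw [List.getD_eq_getElem?_getD, List.getElem?_eq_none (by omega)]; rfl]
        rfl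
    rw [← hval, List.getD_eq_getElem _ _ (by rw [length_sArr]; omega),
      List.getElem?_eq_getElem (by rw [length_sArr]; omega)]
  · rw [if_neg he]
    simp only [sArr, List.getElem?_map]
    by_cases hj : j < tgt.length
    · rw [List.getElem?_range hj]
      simp only [Option.map_some]
      have hgd : (star.set p true).getD j true = star.getD j true := by
        rw [getD_set', if_neg (fun hcc => he hcc.1)]
      rw [hgd]
    · rw [List.getElem?_eq_none (by simpa using hj)]
      rfl

lemma sArr_init (tgt : List Char) : sArr tgt (tgt.map (fun c => c == '*')) = tgt := by
  apply List.ext_getElem?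
  intro j
  simp only [sArr, List.getElem?_map]
  by_cases hj : j < tgt.length
  · rw [List.getElem?_range hj]
    simp only [Option.map_some]
    rw [List.getElem?_eq_getElem hj]
    have hmap : (tgt.map (fun c => c == '*')).getD j true = (tgt[j] == '*') := by
      rw [List.getD_eq_getElem _ _ (by simpa using hj), List.getElem_map]
    rw [hmap]
    by_cases hc : tgt[j] = '*'
    · rw [if_pos (by simp [hc]), hc]
    · rw [if_neg (by simp [hc]), List.getD_eq_getElem _ _ hj]
  · rw [List.getElem?_eq_none (show (List.range tgt.length).length ≤ j by simpa using hj),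
      List.getElem?_eq_none (by omega)]
    rfl

-- A's spliced string is the induced string of the stamped mask
lemma splice_eq_sArr (tgt : List Char) (star : List Bool) (w m : Nat)
    (hwm : w + m ≤ tgt.length) :
    (sArr tgt star).take w ++ List.replicate m '*' ++ (sArr tgt star).drop (w + m) =
      sArr tgt (setWin star w m) := by
  rw [← stamp_foldl (sArr tgt star) w m (by rw [length_sArr]; omega)]
  have aux : ∀ k, w + k ≤ tgt.length →
      (List.range k).foldl (fun s2 t => s2.set (w + t) '*') (sArr tgt star) =
        sArr tgt (setWin star w k) := by
    intro k
    induction k with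
    | zero => intro _; rfl
    | succ k ih =>
      intro hk
      rw [List.range_succ, List.foldl_append, List.foldl_cons, List.foldl_nil, ih (by omega),
        sArr_set tgt _ _ (by omega), setWin_succ]
  exact aux m hwm

lemma loopA_tail_none (stampL : List Char) (n : Nat) (rec : List Char → Option (List Int))
    (s : List Char) (w : Nat)
    (h : ∀ i, w ≤ i → i < n → checkA stampL s n i = false) :
    loopA stampL n rec s w = none := by
  suffices hs : ∀ k w, n - w ≤ k → (∀ i, w ≤ i → i < n → checkA stampL s n i = false) → loopA stampL n rec s w = none from hs (n - w) w le_rfl h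
  intro k
  induction k with
  | zero =>
    intro w hk _
    rw [loopA]
    simp [show ¬ w < n by omega]
  | succ k ih =>
    intro w hk hh
    rw [loopA]
    by_cases hw : w < n
    · simp only [hw, dif_pos, hh w le_rfl hw, Bool.false_eq_true, if_false]
      exact ih (w + 1) (by omega) (fun i h1 h2 => hh i (by omega) h2)
    · simp [hw]

lemma findW_none (bad live : List Int) (W : Nat) (w : Nat)
    (h : ∀ i, w ≤ i → i < W → ¬(bad.getD i 0 == 0 && live.getD i 0 > 0) = true) :
    findW bad live W w = none := by
  suffices hs : ∀ k w, W - w ≤ k → (∀ i, w ≤ i → i < W → ¬(bad.getD i 0 == 0 && live.getD i 0 > 0) = true) → findW bad live W w = none from hs (W - w) w le_rfl h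
  intro k
  induction k with
  | zero =>
    intro w hk _
    rw [findW]
    simp [show ¬ w < W by omega]
  | succ k ih =>
    intro w hk hh
    rw [findW]
    by_cases hw : w < W
    · simp only [hw, dif_pos]
      rw [if_neg (by simpa using hh w le_rfl hw)]
      exact ih (w + 1) (by omega) (fun i h1 h2 => hh i (by omega) h2)
    · simp [hw]

lemma findW_some_lt (bad live : List Int) (W : Nat) :
    ∀ w0 w, findW bad live W w0 = some w → w < W := by
  suffices hs : ∀ k w0 w, W - w0 ≤ k → findW bad live W w0 = some w → w < W from
    fun w0 w => hs (W - w0) w0 w le_rfl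
  intro k
  induction k with
  | zero =>
    intro w0 w hk hf
    rw [findW] at hf
    by_cases hw : w0 < W
    · omega
    · simp [hw] at hf
  | succ k ih =>
    intro w0 w hk hf
    rw [findW] at hf
    by_cases hw : w0 < W
    · simp only [hw, dif_pos] at hf
      by_cases hc : (bad.getD w0 0 == 0 && live.getD w0 0 > 0) = true
      · rw [if_pos hc] at hf
        cases hf
        exact hw
      · rw [if_neg hc] at hf
        exact ih (w0 + 1) w (by omega) hf
    · simp [hw] at hf

lemma checkA_m0 (stampL s : List Char) (n i : Nat) (hm : stampL.length = 0) :
    checkA stampL s n i = false := by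
  unfold checkA
  rw [checkGoA]
  simp [hm]

lemma W_oob_check (stampL tgt s : List Char) (W : Nat)
    (hW : W = if stampL.length ≤ tgt.length then tgt.length - stampL.length + 1 else 0)
    (i : Nat) (hi : W ≤ i) (hin : i < tgt.length) :
    checkA stampL s tgt.length i = false := by
  have hlt : tgt.length < i + stampL.length := by
    by_cases hmn : stampL.length ≤ tgt.length
    · rw [if_pos hmn] at hW
      omega
    · rw [if_neg hmn] at hW
      omega
  exact checkGo_oob stampL s tgt.length i hlt 0 false (by omega)

-- the scans of A and B find the same window
lemma findW_loopA (stampL tgt : List Char) (star : List Bool) (bad live : List Int) (W : Nat)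
    (rec : List Char → Option (List Int))
    (hW : W = if stampL.length ≤ tgt.length then tgt.length - stampL.length + 1 else 0)
    (hlen : star.length = tgt.length) (hOK : StarOK tgt star)
    (hbad : ∀ w, w < W → bad.getD w 0 = badInit stampL tgt star stampL.length w)
    (hlive : ∀ w, w < W → live.getD w 0 = liveInit star stampL.length w) :
    loopA stampL tgt.length rec (sArr tgt star) 0 =
      match findW bad live W 0 with
      | none => none
      | some i =>
          match rec ((sArr tgt star).take i ++ List.replicate stampL.length '*' ++
              (sArr tgt star).drop (i + stampL.length)) with
          | none => none
          | some arr => some (arr ++ [(i : Int)]) := by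
  by_cases hm0 : stampL.length = 0
  · rw [loopA_tail_none stampL tgt.length rec (sArr tgt star) 0
      (fun i _ hi => checkA_m0 stampL _ _ i hm0)]
    rw [findW_none bad live W 0 ?_]
    intro i _ hi
    rw [hlive i hi]
    unfold liveInit
    simp [hm0]
  · have hm1 : 1 ≤ stampL.length := by omega
    suffices aux : ∀ k w, W - w ≤ k → w ≤ W →
        loopA stampL tgt.length rec (sArr tgt star) w =
          match findW bad live W w with
          | none => none
          | some i =>
              match rec ((sArr tgt star).take i ++ List.replicate stampL.length '*' ++
                  (sArr tgt star).drop (i + stampL.length)) with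
              | none => none
              | some arr => some (arr ++ [(i : Int)]) by
      have hW0 : (0:Nat) ≤ W := Nat.zero_le W
      exact aux W 0 (by omega) (by omega)
    intro k
    induction k with
    | zero =>
      intro w hk hwW
      have hnl : ¬ w < W := by omega
      rw [findW, dif_neg hnl]
      rw [loopA_tail_none stampL tgt.length rec (sArr tgt star) w
        (fun i hi1 hi2 => W_oob_check stampL tgt (sArr tgt star) W hW i (by omega) hi2)]
    | succ k ih =>
      intro w hk hwW
      by_cases hweq : w = W
      · have hnl : ¬ w < W := by omega
        rw [findW, dif_neg hnl]
        rw [loopA_tail_none stampL tgt.length rec (sArr tgt star) w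
          (fun i hi1 hi2 => W_oob_check stampL tgt (sArr tgt star) W hW i (by omega) hi2)]
      · have hw : w < W := by omega
        have hmn : stampL.length ≤ tgt.length := by
          by_contra hmn
          rw [if_neg hmn] at hW
          omega
        have hW' := hW
        rw [if_pos hmn] at hW'
        have hwm : w + stampL.length ≤ tgt.length := by omega
        have hwn : w < tgt.length := by omega
        rw [loopA, findW]
        simp only [hwn, hw, dif_pos]
        have hiff := checkA_iff_counters stampL tgt star w hlen hOK hwm
        by_cases hc : badInit stampL tgt star stampL.length w = 0 ∧
            0 < liveInit star stampL.length w
        · rw [if_pos (hiff.mpr hc)]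
          rw [if_pos (by
            rw [hbad w hw, hlive w hw]
            simp only [Bool.and_eq_true, beq_iff_eq, decide_eq_true_eq]
            exact ⟨hc.1, hc.2⟩)]
        · rw [if_neg (by
            intro hck
            exact hc (hiff.mp hck))]
          rw [if_neg (by
            rw [hbad w hw, hlive w hw]
            simp only [Bool.and_eq_true, beq_iff_eq, decide_eq_true_eq]
            exact fun hcc => hc ⟨hcc.1, hcc.2⟩)]
          exact ih (w + 1) (by omega) (by omega)

-- all-star tests of A and B agree on non-empty strings
lemma allstar_iff (s : List Char) (hs : s ≠ []) :
    (s.getD 0 '?' = '*' ∧ (PySem.Set.ofList s).length = 1) ↔ (s.all (· == '*') = true) := by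
  obtain ⟨a, t, rfl⟩ : ∃ a t, s = a :: t := by
    cases s with
    | nil => exact absurd rfl hs
    | cons a t => exact ⟨a, t, rfl⟩
  constructor
  · rintro ⟨h0, h1⟩
    simp only [List.getD_cons_zero] at h0
    subst h0
    obtain ⟨x, hx⟩ : ∃ x, PySem.Set.ofList ('*' :: t) = [x] := by
      cases hL : PySem.Set.ofList ('*' :: t) with
      | nil => rw [hL] at h1; simp at h1
      | cons x r =>
        cases r with
        | nil => exact ⟨x, rfl⟩
        | cons y r' => rw [hL] at h1; simp at h1
    have hstar : x = '*' := by
      have : '*' ∈ PySem.Set.ofList ('*' :: t) := by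
        rw [PySem.Set.mem_ofList]; exact List.mem_cons_self
      rw [hx] at this; exact (List.mem_singleton.mp this).symm
    subst hstar
    simp only [List.all_eq_true, beq_iff_eq]
    intro c hc
    have : c ∈ PySem.Set.ofList ('*' :: t) := by
      rw [PySem.Set.mem_ofList]; exact hc
    rw [hx] at this; simpa using this
  · intro h
    simp only [List.all_eq_true, beq_iff_eq] at h
    have ha : a = '*' := h a List.mem_cons_self
    refine ⟨by simpa using ha, ?_⟩
    cases hL : PySem.Set.ofList (a :: t) with
    | nil =>
      have : a ∈ PySem.Set.ofList (a :: t) := by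
        rw [PySem.Set.mem_ofList]; exact List.mem_cons_self
      rw [hL] at this; simp at this
    | cons x r =>
      cases r with
      | nil => rfl
      | cons y r' =>
        have hnd := PySem.Set.nodup_ofList (xs := a :: t)
        rw [hL] at hnd
        have hxy : x ≠ y := by
          intro hxy; exact (List.nodup_cons.mp hnd).1 (hxy ▸ List.mem_cons_self)
        have hxmem : x ∈ PySem.Set.ofList (a :: t) := by rw [hL]; exact List.mem_cons_self
        have hymem : y ∈ PySem.Set.ofList (a :: t) := by
          rw [hL]; exact List.mem_cons_of_mem _ List.mem_cons_self
        rw [PySem.Set.mem_ofList] at hxmem hymem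
        exact absurd ((h x hxmem).trans (h y hymem).symm) hxy

lemma rem_zero_iff_allstar (tgt : List Char) (star : List Bool)
    (hlen : star.length = tgt.length) (hOK : StarOK tgt star) (hn : tgt ≠ []) :
    remSpec star = 0 ↔
      ((sArr tgt star).getD 0 '?' = '*' ∧ (PySem.Set.ofList (sArr tgt star)).length = 1) := by
  have hsne : sArr tgt star ≠ [] := by
    intro hnil
    have hl := length_sArr tgt star
    rw [hnil] at hl
    exact hn (List.length_eq_zero_iff.mp hl.symm)
  rw [allstar_iff _ hsne]
  unfold remSpec
  rw [Int.natCast_eq_zero, List.length_eq_zero_iff, List.filter_eq_nil_iff]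
  constructor
  · intro h
    rw [List.all_eq_true]
    intro c hc
    obtain ⟨q, hq, rfl⟩ := List.mem_map.mp hc
    have hqn : q < tgt.length := List.mem_range.mp hq
    by_cases hst : star.getD q true = true
    · rw [if_pos hst]
      rfl
    · exfalso
      have hql : q < star.length := by omega
      have hmem : star[q] ∈ star := List.getElem_mem hql
      have hq2 := h star[q] hmem
      have hq3 : star[q] = true := by
        cases hv : star[q]
        · exact absurd (by simp [hv]) hq2
        · rfl
      rw [List.getD_eq_getElem _ _ hql] at hst
      exact hst hq3
  · intro h b hb
    rw [List.all_eq_true] at h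
    obtain ⟨q, hql, rfl⟩ := List.mem_iff_getElem.mp hb
    have hqn : q < tgt.length := by omega
    have hcmem : (if star.getD q true then '*' else tgt.getD q '?') ∈ sArr tgt star := by
      apply List.mem_map.mpr
      exact ⟨q, List.mem_range.mpr hqn, rfl⟩
    have hcq := h _ hcmem
    simp only [Bool.not_eq_true']
    by_cases hst : star.getD q true = true
    · rw [List.getD_eq_getElem _ _ hql] at hst
      simp [hst]
    · exfalso
      rw [if_neg (by simpa using hst)] at hcq
      have heqs : tgt.getD q '?' = '*' := by simpa using hcq
      exact hst (hOK q hqn heqs)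

-- successful dfs returns fewer than `fuel` moves
lemma len_dfsA (stamp : List Char) (n : Nat) :
    ∀ f s l, dfsA stamp n f s = some l → l.length < f := by
  intro f
  induction f with
  | zero => intro s l h; simp [dfsA] at h
  | succ f ih =>
    intro s l h
    rw [dfsA] at h
    split_ifs at h with hc
    · cases h; simp
    · have aux : ∀ k i s' l', n - i ≤ k →
          loopA stamp n (dfsA stamp n f) s' i = some l' → l'.length ≤ f := by
        intro k
        induction k with
        | zero =>
          intro i s' l' hk hl
          rw [loopA] at hl
          simp [show ¬ i < n by omega] at hl
        | succ k ihk =>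
          intro i s' l' hk hl
          rw [loopA] at hl
          by_cases hi : i < n
          · simp only [hi, dif_pos] at hl
            by_cases hchk : checkA stamp s' n i = true
            · simp only [hchk, if_pos] at hl
              cases hd : dfsA stamp n f
                  (s'.take i ++ List.replicate stamp.length '*' ++ s'.drop (i + stamp.length)) with
              | none => rw [hd] at hl; simp at hl
              | some arr =>
                rw [hd] at hl
                simp only [Option.some.injEq] at hl
                subst hl
                have := ih _ arr hd
                simp; omega
            · simp only [hchk, if_neg, Bool.not_eq_true] at hl
              exact ihk (i + 1) s' l' (by omega) hl
          · simp [hi] at hl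
      have := aux (n - 0) 0 s l (by omega) h
      omega

-- main synchronisation: B's counter loop tracks A's dfs round for round
lemma sync (stampL tgt : List Char) (W : Nat)
    (hW : W = if stampL.length ≤ tgt.length then tgt.length - stampL.length + 1 else 0)
    (hn : tgt ≠ []) :
    ∀ f st res, InvB stampL tgt W st →
      roundsB stampL tgt W stampL.length f st res =
        (match dfsA stampL tgt.length f (sArr tgt st.1) with
         | none => []
         | some l => (res ++ l.reverse).reverse) := by
  intro f
  induction f with
  | zero =>
    intro st res hinv
    rfl
  | succ f ih =>
    intro st res hinv
    obtain ⟨star, bad, live, rem⟩ := st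
    obtain ⟨h1, h2, h3, h4, h5, h6, h7⟩ := hinv
    simp only at h1 h2 h3 h4 h5 h6 h7
    rw [roundsB, dfsA]
    simp only
    by_cases hz : remSpec star = 0
    · rw [if_neg (by rw [h7, hz]; simp)]
      rw [if_pos ((rem_zero_iff_allstar tgt star h1 h4 hn).mp hz)]
      simp
    · have hrpos : rem > 0 := by
        have h0 : (0:Int) ≤ remSpec star := by
          unfold remSpec
          exact Int.natCast_nonneg _
        rw [h7]
        omega
      rw [if_pos hrpos]
      rw [if_neg (fun hc => hz ((rem_zero_iff_allstar tgt star h1 h4 hn).mpr hc))]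
      rw [findW_loopA stampL tgt star bad live W (dfsA stampL tgt.length f) hW h1 h4 h5 h6]
      cases hf : findW bad live W 0 with
      | none => rfl
      | some w =>
        have hwW : w < W := findW_some_lt bad live W 0 w hf
        have hmn : stampL.length ≤ tgt.length := by
          by_contra hmn
          rw [if_neg hmn] at hW
          omega
        have hW' := hW
        rw [if_pos hmn] at hW'
        have hwm : w + stampL.length ≤ tgt.length := by omega
        obtain ⟨hinv2, hst1⟩ := stampAt_inv stampL tgt W w (star, bad, live, rem) hW
          ⟨h1, h2, h3, h4, h5, h6, h7⟩ hwm
        have hgoal : roundsB stampL tgt W stampL.length f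
              (stampAt stampL tgt W stampL.length w (star, bad, live, rem)) (res ++ [(w : Int)]) =
            match (match dfsA stampL tgt.length f
                ((sArr tgt star).take w ++ List.replicate stampL.length '*' ++
                  (sArr tgt star).drop (w + stampL.length)) with
              | none => none
              | some arr => some (arr ++ [(w : Int)])) with
            | none => ([] : List Int)
            | some l => (res ++ l.reverse).reverse := by
          rw [splice_eq_sArr tgt star w stampL.length hwm]
          rw [ih (stampAt stampL tgt W stampL.length w (star, bad, live, rem))
            (res ++ [(w : Int)]) hinv2]
          rw [hst1]
          cases hd : dfsA stampL tgt.length f (sArr tgt (setWin star w stampL.length)) with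
          | none => rfl
          | some arr =>
            simp [List.reverse_append, List.append_assoc]
        exact hgoal

-- ===== VERDICT (by name: the statement is the Claim_ definition above) =====
theorem movesToStamp_spec : Claim_equal_movesToStamp := by
  unfold Claim_equal_movesToStamp Spec_movesToStamp
  intro stamp target _ hpre
  have hne : target.toList ≠ [] := by
    simpa [String.toList_eq_nil_iff] using hpre
  have hn1 : 0 < target.toList.length := List.length_pos_iff.mpr hne
  set tgt := target.toList with htgt
  set stampL := stamp.toList with hstL
  set n := tgt.length with hndef
  set m := stampL.length with hmdef
  set star0 := tgt.map (fun c => c == '*') with hstar0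
  set W := if m ≤ n then n - m + 1 else 0 with hWdef
  have hA : movesToStamp stamp target =
      (match dfsA stampL n (n + 1) tgt with
       | none => ([] : List Int)
       | some ans => if ans.length ≤ 10 * n then ans else []) := rfl
  have hB : movesToStamp_alt stamp target =
      roundsB stampL tgt W m (n + 1)
        (star0,
         (List.range W).map (fun w => badInit stampL tgt star0 m w),
         (List.range W).map (fun w => liveInit star0 m w),
         (((star0.filter (fun b => !b)).length : Nat) : Int)) [] := rfl
  rw [hA, hB]
  have hstar0getD : ∀ p, p < n → star0.getD p true = (tgt.getD p '?' == '*') := by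
    intro p hp
    rw [hstar0, List.getD_eq_getElem _ _ (by simpa using hp), List.getElem_map,
      List.getD_eq_getElem _ _ hp]
  have hinv0 : InvB stampL tgt W (star0,
      (List.range W).map (fun w => badInit stampL tgt star0 m w),
      (List.range W).map (fun w => liveInit star0 m w),
      (((star0.filter (fun b => !b)).length : Nat) : Int)) := by
    refine ⟨by simp [hstar0], by simp, by simp, ?_, ?_, ?_, rfl⟩
    · intro p hp hstar
      rw [hstar0getD p hp, hstar]
      rfl
    · intro w hw
      simp only
      rw [List.getD_eq_getElem _ _ (by simpa using hw), List.getElem_map, List.getElem_range]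
    · intro w hw
      simp only
      rw [List.getD_eq_getElem _ _ (by simpa using hw), List.getElem_map, List.getElem_range]
  rw [sync stampL tgt W hWdef hne (n + 1) _ [] hinv0]
  simp only
  rw [hstar0, sArr_init]
  cases hd : dfsA stampL n (n + 1) tgt with
  | none => rfl
  | some l =>
    have hlen := len_dfsA stampL n (n + 1) tgt l hd
    have hfin : (if l.length ≤ 10 * n then l else []) = ([] ++ l.reverse).reverse := by
      rw [if_pos (by omega)]
      simp
    exact hfin
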